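-- pv_equiv track=rewrite | github.com/hyohyeon01/Baek_ioon | 프로그래머스/0/181887. 홀수 vs 짝수/홀수 vs 짝수.py | solution
-- ===== SOURCE A (Python) =====
-- def solution(num_list):
--     answer = 0
--     even = 0
--     odd = 0
--     for i in range(1,len(num_list)+1):
--         if i % 2 == 0:
--             even += num_list[i-1]
--         else:
--             odd += num_list[i-1]
--     if(even > odd):
--         answer =even
--     else:
--         answer = odd
--     return answer
-- ===== SOURCE B (Python) =====
-- def solution(num_list):
--     # two staged passes over distinct strided subsequences; no index loop, no parity test
--     odd = sum(num_list[0::2])    # 1-based odd positions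
--     even = sum(num_list[1::2])   # 1-based even positions
--     return max(odd, even)        # tie -> odd, matching A's if/else
-- ===== Notes on version B (the rewrite author's own statement) =====
-- stated objective: idiomatic
-- what changed: Replaces the single 1-based indexed loop with a parity branch by two staged passes over strided slices: odd = sum(num_list[0::2]), even = sum(num_list[1::2]), then max(odd, even).
import Mathlib
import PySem

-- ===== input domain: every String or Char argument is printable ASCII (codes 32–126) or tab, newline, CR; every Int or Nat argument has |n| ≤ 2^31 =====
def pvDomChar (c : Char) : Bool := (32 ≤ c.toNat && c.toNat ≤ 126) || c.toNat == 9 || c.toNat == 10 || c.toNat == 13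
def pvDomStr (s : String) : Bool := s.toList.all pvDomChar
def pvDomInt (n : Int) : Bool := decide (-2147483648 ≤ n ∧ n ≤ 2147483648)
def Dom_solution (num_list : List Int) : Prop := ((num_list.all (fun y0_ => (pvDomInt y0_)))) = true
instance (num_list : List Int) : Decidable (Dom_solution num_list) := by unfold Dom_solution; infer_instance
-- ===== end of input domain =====

-- B replaces the indexed loop with a parity branch by two staged passes over strided slices (idiomatic; same cost).

-- ===== PORT A =====
-- loop body: 'if i % 2 == 0: even += num_list[i-1] else: odd += num_list[i-1]'; state = (even, odd).
-- pyGetD is exact here: i - 1 ranges over [0, len) so the access never raises.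
def stepA (xs : List Int) (acc : Int × Int) (i : Int) : Int × Int :=
  if PySem.Int.mod i 2 = 0 then (acc.1 + PySem.List.pyGetD xs (i - 1) 0, acc.2)
  else (acc.1, acc.2 + PySem.List.pyGetD xs (i - 1) 0)

def solution (num_list : List Int) : Int :=
  let st := (PySem.List.pyRange 1 ((num_list.length : Int) + 1) 1).foldl (stepA num_list) (0, 0)
  if st.1 > st.2 then st.1 else st.2

-- ===== PORT B =====
-- 'odd = sum(num_list[0::2]); even = sum(num_list[1::2]); return max(odd, even)'
-- (slice? never returns none here: step = 2 ≠ 0, so getD [] is inert)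
def solution_alt (num_list : List Int) : Int :=
  let odd := ((PySem.List.slice? num_list (some 0) none 2).getD []).sum
  let even := ((PySem.List.slice? num_list (some 1) none 2).getD []).sum
  max odd even

-- ===== PRECONDITION & SPEC =====
def Spec_solution (num_list : List Int) (out : Int) : Prop := out = solution_alt num_list
instance (num_list : List Int) (out : Int) : Decidable (Spec_solution num_list out) := by unfold Spec_solution; infer_instance

-- ===== CLAIM (what is proved, stated in full; the proofs are below) =====
def Claim_equal_solution : Prop := ∀ (num_list : List Int), Dom_solution num_list → Spec_solution num_list (solution num_list)

-- ===== LEMMAS AND PROOFS =====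

-- the 1-based odd-position elements (xs[0::2]) and even-position elements (xs[1::2])
def ev : List Int → List Int
  | [] => []
  | [x] => [x]
  | x :: _ :: r => x :: ev r

def od : List Int → List Int
  | [] => []
  | [_] => []
  | _ :: y :: r => y :: od r

theorem fm_ev : ∀ (xs : List Int),
    List.filterMap (fun k : Nat => xs[2 * k]?) (List.range ((xs.length + 1) / 2)) = ev xs
  | [] => by simp [ev]
  | [x] => by simp [ev]
  | x :: y :: r => by
    have ih := fm_ev r
    have hl : ((x :: y :: r).length + 1) / 2 = (r.length + 1) / 2 + 1 := by
      simp [List.length]; omega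
    rw [hl, List.range_succ_eq_map, List.filterMap_cons]
    simp only [List.filterMap_map, Function.comp_def]
    norm_num
    rw [List.filterMap_congr (fun k _ => show (x :: y :: r)[2 * (k + 1)]? = r[2 * k]? from by
      rw [show 2 * (k + 1) = 2 * k + 1 + 1 from by omega, List.getElem?_cons_succ,
        List.getElem?_cons_succ]), ih, ev]

theorem fm_od : ∀ (xs : List Int),
    List.filterMap (fun k : Nat => xs[2 * k + 1]?) (List.range (xs.length / 2)) = od xs
  | [] => by simp [od]
  | [x] => by simp [od]
  | x :: y :: r => by
    have ih := fm_od r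
    have hl : (x :: y :: r).length / 2 = r.length / 2 + 1 := by
      simp [List.length]; omega
    rw [hl, List.range_succ_eq_map, List.filterMap_cons]
    simp only [List.filterMap_map, Function.comp_def]
    norm_num
    rw [List.filterMap_congr (fun k _ => show (y :: r)[2 * (k + 1)]? = r[2 * k + 1]? from by
      rw [show 2 * (k + 1) = (2 * k + 1) + 1 from by omega, List.getElem?_cons_succ]), ih, od]

theorem slice0_eq_ev (xs : List Int) :
    PySem.List.slice? xs (some 0) none 2 = some (ev xs) := by
  simp only [PySem.List.slice?, PySem.List.sliceIndices]
  norm_num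
  have hc : (if 0 < xs.length then (((xs.length : Int) + 2 - 1) / 2).toNat else 0)
      = (xs.length + 1) / 2 := by
    split <;> omega
  have hf : (fun k : Nat => xs[(2 * (k : Int)).toNat]?) = (fun k : Nat => xs[2 * k]?) := by
    funext k; rw [show (2 * (k : Int)).toNat = 2 * k from by omega]
  rw [hc, hf, fm_ev]

theorem slice1_eq_od (xs : List Int) :
    PySem.List.slice? xs (some 1) none 2 = some (od xs) := by
  cases xs with
  | nil => decide
  | cons x t =>
    simp only [PySem.List.slice?, PySem.List.sliceIndices]
    norm_num
    have hc : (if 0 < t.length then (((t.length : Int) + 2 - 1) / 2).toNat else 0)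
        = (x :: t).length / 2 := by
      simp only [List.length_cons]
      split <;> omega
    have hf : (fun k : Nat => (x :: t)[(1 + 2 * (k : Int)).toNat]?)
        = (fun k : Nat => (x :: t)[2 * k + 1]?) := by
      funext k; rw [show (1 + 2 * (k : Int)).toNat = 2 * k + 1 from by omega]
    rw [hc, hf, fm_od]

theorem pymod2 (a : Int) : PySem.Int.mod a 2 = a % 2 := by
  unfold PySem.Int.mod; rw [Int.fmod_eq_emod]; simp

-- A's loop rephrased over enumerate: same function of (index, element).
def stepE (acc : Int × Int) (jx : Int × Int) : Int × Int :=
  if PySem.Int.mod (jx.1 + 1) 2 = 0 then (acc.1 + jx.2, acc.2) else (acc.1, acc.2 + jx.2)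

theorem bridge (xs : List Int) (e o : Int) :
    (PySem.List.pyRange 1 ((xs.length : Int) + 1) 1).foldl (stepA xs) (e, o)
      = (PySem.List.enumerate xs 0).foldl stepE (e, o) := by
  rw [PySem.List.enumerate_eq_map_pyRange (d := 0), List.foldl_map,
      PySem.List.pyRange_one 1, PySem.List.pyRange_one 0, List.foldl_map, List.foldl_map]
  simp only [PySem.List.len_eq, sub_zero, add_sub_cancel_right, Int.toNat_natCast]
  have hf : (fun (acc : Int × Int) (k : Nat) => stepA xs acc (1 + (k : Int)))
      = (fun (acc : Int × Int) (k : Nat) => stepE acc (0 + (k : Int), PySem.List.pyGetD xs (0 + (k : Int)) 0)) := by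
    funext acc k
    simp [stepA, stepE, add_comm]
  rw [hf]

theorem main_lemma : ∀ (xs : List Int) (s e o : Int), 0 ≤ s → s % 2 = 0 →
    (PySem.List.enumerate xs s).foldl stepE (e, o)
      = (e + (od xs).sum, o + (ev xs).sum)
  | [], s, e, o, hs, hp => by
    simp [PySem.List.enumerate_nil, ev, od]
  | [x], s, e, o, hs, hp => by
    have h1 : PySem.Int.mod (s + 1) 2 = 1 := by
      rw [pymod2]; omega
    simp only [PySem.List.enumerate_cons, PySem.List.enumerate_nil, List.foldl_cons,
      List.foldl_nil, stepE]
    rw [if_neg (by rw [h1]; exact one_ne_zero)]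
    simp [ev, od]
  | x :: y :: r, s, e, o, hs, hp => by
    have h1 : PySem.Int.mod (s + 1) 2 = 1 := by
      rw [pymod2]; omega
    have h2 : PySem.Int.mod (s + 1 + 1) 2 = 0 := by
      rw [pymod2]; omega
    have ih := main_lemma r (s + 2) (e + y) (o + x) (by omega) (by omega)
    simp only [PySem.List.enumerate_cons, List.foldl_cons, stepE, h1, h2]
    norm_num
    simp only [show s + 1 + 1 = s + 2 from by ring] at ih ⊢
    rw [ih]
    simp [ev, od]
    constructor <;> ring

-- ===== VERDICT (by name: the statement is the Claim_ definition above) =====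
theorem solution_spec : Claim_equal_solution := by
  intro xs _
  unfold Spec_solution solution solution_alt
  rw [bridge, main_lemma xs 0 0 0 (le_refl 0) rfl, slice0_eq_ev, slice1_eq_od]
  simp only [Option.getD_some, zero_add]
  by_cases h : (ev xs).sum < (od xs).sum <;> simp [max_def] <;> omega
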